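-- pv_equiv track=rewrite | github.com/jubin75/SPOT | scripts/rebuild_frag_metadata.py | detect_smiles_column
-- ===== SOURCE A (Python) =====
-- def detect_smiles_column(fieldnames) -> str:
--     """Best-effort detection of the SMILES column in a CSV."""
--     if not fieldnames:
--         raise ValueError("No columns found in frag CSV")
--     lowered = [c.lower() for c in fieldnames]
--     # Prefer exact 'smiles'
--     for name, low in zip(fieldnames, lowered):
--         if low == "smiles":
--             return name
--     # Then any column containing 'smile' / 'smiles'
--     for name, low in zip(fieldnames, lowered):
--         if "smiles" in low or "smile" in low:
--             return name
--     # Fallback: first column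
--     return fieldnames[0]
-- ===== SOURCE B (Python) =====
-- def detect_smiles_column(fieldnames) -> str:
--     """Best-effort detection of the SMILES column in a CSV (single pass)."""
--     if not fieldnames:
--         raise ValueError("No columns found in frag CSV")
--     partial = None
--     for name in fieldnames:
--         low = name.lower()
--         if low == "smiles":
--             return name
--         if partial is None and "smile" in low:
--             partial = name
--     return partial if partial is not None else fieldnames[0]
-- ===== Notes on version B (the rewrite author's own statement) =====
-- stated objective: simpler
-- what changed: Replaces A's two sequential scans (exact match, then substring match) with one pass that returns an exact 'smiles' match immediately and remembers the first substring match as a deferred candidate; one 'smile' test replaces A's two substring tests since 'smiles' in low implies 'smile' in low.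
import Mathlib
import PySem

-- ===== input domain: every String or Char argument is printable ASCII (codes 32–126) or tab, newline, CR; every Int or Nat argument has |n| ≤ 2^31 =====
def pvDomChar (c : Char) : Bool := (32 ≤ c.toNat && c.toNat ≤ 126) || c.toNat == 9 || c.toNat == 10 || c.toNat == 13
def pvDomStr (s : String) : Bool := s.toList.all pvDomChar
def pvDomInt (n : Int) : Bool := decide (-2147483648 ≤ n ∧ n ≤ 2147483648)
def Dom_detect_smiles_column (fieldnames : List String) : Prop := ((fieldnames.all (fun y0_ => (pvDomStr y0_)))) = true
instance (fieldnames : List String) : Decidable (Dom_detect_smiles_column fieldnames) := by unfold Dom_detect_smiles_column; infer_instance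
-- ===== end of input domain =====

-- B replaces A's two sequential scans with one pass that returns an exact match
-- immediately and remembers the first substring match as a deferred candidate (objective: simpler).

-- ===== PORT A =====
-- two scans over zip(fieldnames, lowered), then fallback fieldnames[0]
def detect_smiles_column (fieldnames : List String) : String :=
  let lowered := fieldnames.map PySem.Str.lower
  match (fieldnames.zip lowered).find? (fun p => p.2 == "smiles") with
  | some p => p.1
  | none =>
    match (fieldnames.zip lowered).find?
        (fun p => PySem.Str.isIn "smiles" p.2 || PySem.Str.isIn "smile" p.2) with
    | some p => p.1
    | none => PySem.List.pyGetD fieldnames 0 ""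

-- ===== PORT B =====
-- single pass: `part` is the remembered first partial match, `fb` the fallback fieldnames[0]
def dscGo (xs : List String) (part : Option String) (fb : String) : String :=
  match xs with
  | [] => part.getD fb
  | name :: rest =>
    let low := PySem.Str.lower name
    if low == "smiles" then name
    else dscGo rest (if part.isNone && PySem.Str.isIn "smile" low then some name else part) fb

def detect_smiles_column_alt (fieldnames : List String) : String :=
  dscGo fieldnames none (PySem.List.pyGetD fieldnames 0 "")

-- ===== PRECONDITION & SPEC =====
-- Python A raises ValueError on an empty fieldnames list; exactly that input is excluded.
def Pre_detect_smiles_column (fieldnames : List String) : Prop := fieldnames ≠ []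
instance (fieldnames : List String) : Decidable (Pre_detect_smiles_column fieldnames) := by
  unfold Pre_detect_smiles_column; infer_instance
def pvWitness_detect_smiles_column : List String := (["id", "Canonical_SMILES", "name"])

def Spec_detect_smiles_column (fieldnames : List String) (out : String) : Prop := out = detect_smiles_column_alt fieldnames
instance (fieldnames : List String) (out : String) : Decidable (Spec_detect_smiles_column fieldnames out) := by unfold Spec_detect_smiles_column; infer_instance

-- ===== CLAIM (what is proved, stated in full; the proofs are below) =====
def Claim_equal_detect_smiles_column : Prop := ∀ (fieldnames : List String), Dom_detect_smiles_column fieldnames → Pre_detect_smiles_column fieldnames → Spec_detect_smiles_column fieldnames (detect_smiles_column fieldnames)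

-- ===== LEMMAS AND PROOFS =====

-- "smiles" occurring in s implies "smile" occurring in s (so A's second predicate is 'smile' alone)
lemma isIn_smiles_imp_smile (s : String) :
    PySem.Str.isIn "smiles" s = true → PySem.Str.isIn "smile" s = true := by
  intro h
  rw [PySem.Str.isIn_iff_infix] at h ⊢
  exact List.IsInfix.trans (by decide) h

lemma dscGo_eq (xs : List String) (part : Option String) (fb : String) :
    dscGo xs part fb =
      match (xs.zip (xs.map PySem.Str.lower)).find? (fun p => p.2 == "smiles") with
      | some p => p.1
      | none =>
        match part with
        | some q => q
        | none =>
          match (xs.zip (xs.map PySem.Str.lower)).find?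
              (fun p => PySem.Str.isIn "smiles" p.2 || PySem.Str.isIn "smile" p.2) with
          | some p => p.1
          | none => fb := by
  induction xs generalizing part with
  | nil => cases part <;> simp [dscGo]
  | cons name rest ih =>
    simp only [List.map_cons, List.zip_cons_cons, List.find?_cons]
    by_cases hex : (PySem.Str.lower name == "smiles") = true
    · simp [dscGo, hex]
    · simp only [dscGo, hex, if_false, Bool.false_eq_true]
      cases part with
      | some q => simp [ih]
      | none =>
        by_cases hp : PySem.Str.isIn "smile" (PySem.Str.lower name) = true
        · simp only [Option.isNone_none, Bool.true_and, hp, if_true, ih, Bool.or_true]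
        · have hp' : PySem.Str.isIn "smile" (PySem.Str.lower name) = false := by
            cases h : PySem.Str.isIn "smile" (PySem.Str.lower name) with
            | false => rfl
            | true => exact absurd h hp
          have hps : PySem.Str.isIn "smiles" (PySem.Str.lower name) = false := by
            cases h : PySem.Str.isIn "smiles" (PySem.Str.lower name) with
            | false => rfl
            | true => exact absurd (isIn_smiles_imp_smile _ h) hp
          simp only [Option.isNone_none, Bool.true_and, hp', if_false, hps, ih,
            Bool.or_self, Bool.false_eq_true]

-- ===== VERDICT (by name: the statement is the Claim_ definition above) =====
theorem detect_smiles_column_spec : Claim_equal_detect_smiles_column := by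
  intro fieldnames _ _
  unfold Spec_detect_smiles_column detect_smiles_column detect_smiles_column_alt
  rw [dscGo_eq]
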